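-- pv_equiv track=rewrite | github.com/sheshanth123/Algorithms | Easy/arrPartition.py | solve
-- ===== SOURCE A (Python) =====
-- def solve(A):
--     newArr = []
--
--     for elem in A:
--         if elem:
--             continue
--         newArr.append(elem)
--
--     for elem in A:
--         if elem:
--             newArr.append(elem)
--
--     return newArr
-- ===== SOURCE B (Python) =====
-- def solve(A):
--     falsy = []
--     truthy = []
--     for elem in A:
--         if elem:
--             truthy.append(elem)
--         else:
--             falsy.append(elem)
--     return falsy + truthy
-- ===== Notes on version B (the rewrite author's own statement) =====
-- stated objective: alternative
-- what changed: Replaces A's two sequential scans of the array with a single pass maintaining two accumulators (falsy, truthy) that are concatenated at the end.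
import Mathlib
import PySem

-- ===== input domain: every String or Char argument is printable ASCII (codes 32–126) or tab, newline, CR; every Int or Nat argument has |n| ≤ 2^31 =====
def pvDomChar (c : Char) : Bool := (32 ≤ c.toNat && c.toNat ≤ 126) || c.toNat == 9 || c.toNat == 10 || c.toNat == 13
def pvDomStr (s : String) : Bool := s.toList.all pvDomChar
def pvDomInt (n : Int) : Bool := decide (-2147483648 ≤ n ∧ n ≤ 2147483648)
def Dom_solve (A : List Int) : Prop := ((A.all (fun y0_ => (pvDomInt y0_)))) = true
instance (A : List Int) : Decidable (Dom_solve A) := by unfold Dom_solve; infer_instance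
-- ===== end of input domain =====

-- B replaces A's two sequential scans with one pass keeping two accumulators (falsy, truthy), concatenated at the end.

-- ===== PORT A =====
-- first loop: append the falsy (== 0) elements; second loop: append the truthy ones
def solve (A : List Int) : List Int :=
  let newArr := A.foldl (fun acc elem => if elem ≠ 0 then acc else acc ++ [elem]) []
  A.foldl (fun acc elem => if elem ≠ 0 then acc ++ [elem] else acc) newArr

-- ===== PORT B =====
-- single pass with two accumulators
def solveAltLoop : List Int → List Int → List Int → List Int × List Int
  | [], falsy, truthy => (falsy, truthy)
  | elem :: rest, falsy, truthy =>
      if elem ≠ 0 then solveAltLoop rest falsy (truthy ++ [elem])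
      else solveAltLoop rest (falsy ++ [elem]) truthy

def solve_alt (A : List Int) : List Int :=
  let p := solveAltLoop A [] []
  p.1 ++ p.2

-- ===== PRECONDITION & SPEC =====
def Spec_solve (A : List Int) (out : List Int) : Prop := out = solve_alt A
instance (A : List Int) (out : List Int) : Decidable (Spec_solve A out) := by unfold Spec_solve; infer_instance

-- ===== CLAIM (what is proved, stated in full; the proofs are below) =====
def Claim_equal_solve : Prop := ∀ (A : List Int), Dom_solve A → Spec_solve A (solve A)

-- ===== LEMMAS AND PROOFS =====
lemma foldl_falsy (A : List Int) : ∀ (acc : List Int),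
    A.foldl (fun acc elem => if elem ≠ 0 then acc else acc ++ [elem]) acc
      = acc ++ A.filter (fun e => e == 0) := by
  induction A with
  | nil => intro acc; simp
  | cons x xs ih =>
      intro acc
      rw [List.foldl_cons, ih]
      by_cases h : x = 0 <;> simp [List.filter_cons, h]

lemma foldl_truthy (A : List Int) : ∀ (acc : List Int),
    A.foldl (fun acc elem => if elem ≠ 0 then acc ++ [elem] else acc) acc
      = acc ++ A.filter (fun e => !(e == 0)) := by
  induction A with
  | nil => intro acc; simp
  | cons x xs ih =>
      intro acc
      rw [List.foldl_cons, ih]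
      by_cases h : x = 0 <;> simp [List.filter_cons, h]

lemma solveAltLoop_eq (A : List Int) : ∀ (f t : List Int),
    solveAltLoop A f t = (f ++ A.filter (fun e => e == 0), t ++ A.filter (fun e => !(e == 0))) := by
  induction A with
  | nil => intro f t; simp [solveAltLoop]
  | cons x xs ih =>
      intro f t
      by_cases h : x = 0
      · rw [solveAltLoop, if_neg (by simp [h]), ih]
        simp [List.filter_cons, h]
      · rw [solveAltLoop, if_pos h, ih]
        simp [List.filter_cons, h]

-- ===== VERDICT (by name: the statement is the Claim_ definition above) =====
theorem solve_spec : Claim_equal_solve := by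
  intro A _
  unfold Spec_solve solve solve_alt
  rw [foldl_truthy, foldl_falsy, solveAltLoop_eq]
  simp
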